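-- pv_equiv track=rewrite | github.com/f-lab-edu/news_app | utils/new_utils.py | get_embedding_topic
-- ===== SOURCE A (Python) =====
-- def get_embedding_topic(word_index, embedding_description_list):
--     embedding_value = -1
--     result_topic = ''
--     for i in embedding_description_list:
--         for key, value in word_index.items():
--             if value == i:
--                 if value > embedding_value:
--                     result_topic = key
--                     embedding_value = value
--     return embedding_value, result_topic
-- ===== SOURCE B (Python) =====
-- def get_embedding_topic(word_index, embedding_description_list):
--     values = set(word_index.values())
--     best = max([i for i in embedding_description_list if i > -1 and i in values],
--                default=-1)
--     if best == -1:
--         return -1, ''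
--     key = next((k for k, v in word_index.items() if v == best), '')
--     return best, key
-- ===== Notes on version B (the rewrite author's own statement) =====
-- stated objective: faster
-- what changed: Replaces A's nested scan (for every list element, rescan all dict items keeping a running (value,key) state) by three independent passes: build the set of dict values once, take the max of the list elements that are > -1 and in that set, then look up the first key with that value.
import Mathlib
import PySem

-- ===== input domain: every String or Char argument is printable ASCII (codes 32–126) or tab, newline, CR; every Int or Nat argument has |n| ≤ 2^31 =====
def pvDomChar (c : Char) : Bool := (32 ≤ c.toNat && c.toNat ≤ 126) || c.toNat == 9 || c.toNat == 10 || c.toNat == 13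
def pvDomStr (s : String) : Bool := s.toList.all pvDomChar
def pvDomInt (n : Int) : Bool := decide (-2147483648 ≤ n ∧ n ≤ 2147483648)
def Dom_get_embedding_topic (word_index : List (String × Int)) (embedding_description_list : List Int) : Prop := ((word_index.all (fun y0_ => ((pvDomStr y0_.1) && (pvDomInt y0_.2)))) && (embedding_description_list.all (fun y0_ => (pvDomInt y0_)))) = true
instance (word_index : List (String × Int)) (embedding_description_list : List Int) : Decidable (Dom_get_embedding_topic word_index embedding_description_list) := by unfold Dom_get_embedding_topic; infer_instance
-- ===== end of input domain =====

-- B replaces A's nested list×dict scan (O(n·m)) by: set of dict values, one max over the list, one key lookup (O(n+m)); return value only.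

-- ===== PORT A =====
def get_embedding_topic (word_index : List (String × Int)) (embedding_description_list : List Int) : Int × String :=
  embedding_description_list.foldl
    (fun st i =>
      (PySem.Dict.ofList word_index).items.foldl
        (fun st kv =>
          if kv.2 == i then
            if kv.2 > st.1 then (kv.2, kv.1) else st
          else st)
        st)
    (-1, "")

-- ===== PORT B =====
def get_embedding_topic_alt (word_index : List (String × Int)) (embedding_description_list : List Int) : Int × String :=
  let values : PySem.Set Int := PySem.Set.ofList (PySem.Dict.ofList word_index).values
  let best : Int :=
    PySem.List.maxD
      (embedding_description_list.filter (fun i => decide (i > -1) && values.contains i))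
      (fun x => x) (-1)
  if best == -1 then (-1, "")
  else
    match (PySem.Dict.ofList word_index).items.find? (fun kv => kv.2 == best) with
    | some kv => (best, kv.1)
    | none => (best, "")

-- ===== PRECONDITION & SPEC =====
def Spec_get_embedding_topic (word_index : List (String × Int)) (embedding_description_list : List Int) (out : Int × String) : Prop := out = get_embedding_topic_alt word_index embedding_description_list
instance (word_index : List (String × Int)) (embedding_description_list : List Int) (out : Int × String) : Decidable (Spec_get_embedding_topic word_index embedding_description_list out) := by unfold Spec_get_embedding_topic; infer_instance

-- ===== CLAIM (what is proved, stated in full; the proofs are below) =====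
def Claim_equal_get_embedding_topic : Prop := ∀ (word_index : List (String × Int)) (embedding_description_list : List Int), Dom_get_embedding_topic word_index embedding_description_list → Spec_get_embedding_topic word_index embedding_description_list (get_embedding_topic word_index embedding_description_list)

-- ===== LEMMAS AND PROOFS =====

-- A's inner loop over the dict items, for one fixed list element i
def pvAStep (items : List (String × Int)) (st : Int × String) (i : Int) : Int × String :=
  items.foldl
    (fun st kv =>
      if kv.2 == i then
        if kv.2 > st.1 then (kv.2, kv.1) else st
      else st)
    st

-- B's running-max step over the description list
def pvBStep (values : PySem.Set Int) (acc : Int) (i : Int) : Int :=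
  if decide (i > -1) && values.contains i then max acc i else acc

-- coupling invariant between A's (value, topic) state and B's running max
def pvInv (items : List (String × Int)) (st : Int × String) (acc : Int) : Prop :=
  (acc = -1 ∧ st = (-1, "")) ∨
  (-1 < acc ∧ st.1 = acc ∧
    ∃ kv, items.find? (fun p => p.2 == acc) = some kv ∧ st.2 = kv.1)

-- A's inner pass = one lookup of the first pair with value i, guarded by i > st.1
theorem pvAStep_eq_find (items : List (String × Int)) (st : Int × String) (i : Int) :
    pvAStep items st i =
      match items.find? (fun kv => kv.2 == i) with
      | some kv => if i > st.1 then (i, kv.1) else st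
      | none => st := by
  induction items generalizing st with
  | nil => rfl
  | cons hd tl ih =>
    obtain ⟨k, v⟩ := hd
    by_cases hv : v = i
    · subst hv
      by_cases hi : v > st.1
      · simp only [pvAStep, List.foldl_cons, List.find?_cons, beq_self_eq_true, if_pos hi,
          ite_true]
        simp only [pvAStep] at ih
        rw [ih]
        cases h : tl.find? (fun kv => kv.2 == v) with
        | none => simp
        | some kv => simp
      · simp only [pvAStep, List.foldl_cons, List.find?_cons, beq_self_eq_true, if_neg hi,
          ite_true]
        simp only [pvAStep] at ih
        rw [ih]
        cases h : tl.find? (fun kv => kv.2 == v) with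
        | none => simp
        | some kv => simp [hi]
    · have hb : ((k, v).2 == i) = false := by simpa using hv
      simp only [pvAStep, List.foldl_cons, List.find?_cons, hb, Bool.false_eq_true, ite_false]
      simp only [pvAStep] at ih
      exact ih st

-- the invariant survives one list element
theorem pvInv_step (items : List (String × Int)) (values : PySem.Set Int)
    (hv : ∀ i : Int, values.contains i = (items.find? (fun p => p.2 == i)).isSome)
    (st : Int × String) (acc : Int) (i : Int) (h : pvInv items st acc) :
    pvInv items (pvAStep items st i) (pvBStep values acc i) := by
  have hst1 : st.1 = acc := by
    rcases h with ⟨h1, h2⟩ | ⟨_, h2, _⟩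
    · rw [h2, h1]
    · exact h2
  have hacc : -1 ≤ acc := by
    rcases h with ⟨h1, _⟩ | ⟨h1, _, _⟩ <;> omega
  rw [pvAStep_eq_find]
  cases hf : items.find? (fun kv => kv.2 == i) with
  | none =>
    have hc : values.contains i = false := by rw [hv, hf]; rfl
    have hb : pvBStep values acc i = acc := by
      simp only [pvBStep, hc, Bool.and_false, Bool.false_eq_true, if_false]
    rw [hb]
    exact h
  | some kv =>
    have hc : values.contains i = true := by rw [hv, hf]; rfl
    have hred : (match some kv with
        | some kv => if i > st.1 then (i, kv.1) else st
        | none => st) = if i > st.1 then (i, kv.1) else st := rfl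
    rw [hred]
    by_cases hi : i > st.1
    · have higt : -1 < i := by omega
      have hb : pvBStep values acc i = i := by
        simp only [pvBStep, hc, Bool.and_true, decide_eq_true_eq]
        rw [if_pos higt]
        omega
      rw [if_pos hi, hb]
      exact Or.inr ⟨higt, rfl, kv, hf, rfl⟩
    · have hb : pvBStep values acc i = acc := by
        simp only [pvBStep, hc, Bool.and_true]
        split <;> [skip; rfl]
        omega
      rw [if_neg hi, hb]
      exact h
-- the invariant survives the whole list
theorem pvInv_foldl (items : List (String × Int)) (values : PySem.Set Int)
    (hv : ∀ i : Int, values.contains i = (items.find? (fun p => p.2 == i)).isSome)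
    (l : List Int) (st : Int × String) (acc : Int) (h : pvInv items st acc) :
    pvInv items (l.foldl (pvAStep items) st) (l.foldl (pvBStep values) acc) := by
  induction l generalizing st acc with
  | nil => exact h
  | cons x t ih => exact ih _ _ (pvInv_step items values hv st acc x h)

-- max with default over a list of elements all > -1 is the running max from -1
theorem pvMaxD_pos (F : List Int) (h : ∀ x ∈ F, -1 < x) :
    PySem.List.maxD F (fun x => x) (-1) = F.foldl max (-1) := by
  cases F with
  | nil => rfl
  | cons x t =>
    have hx : max (-1 : Int) x = x :=
      max_eq_right (le_of_lt (h x (by simp)))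
    rw [PySem.List.maxD, PySem.List.max?_id_cons, Option.getD_some, List.foldl_cons, hx]

-- ===== VERDICT (by name: the statement is the Claim_ definition above) =====
theorem get_embedding_topic_spec : Claim_equal_get_embedding_topic := by
  intro wi l _
  set items := (PySem.Dict.ofList wi).items with hitems
  set values : PySem.Set Int := PySem.Set.ofList (PySem.Dict.ofList wi).values with hvalues
  have hval : (PySem.Dict.ofList wi).values = items.map (fun p => p.2) := rfl
  have hv : ∀ i : Int, values.contains i = (items.find? (fun p => p.2 == i)).isSome := by
    intro i
    rw [Bool.eq_iff_iff]
    simp only [hvalues, hval, PySem.Set.contains, List.contains_eq_mem, decide_eq_true_eq,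
      PySem.Set.mem_ofList, List.mem_map, List.find?_isSome, beq_iff_eq]
  have hA : get_embedding_topic wi l = l.foldl (pvAStep items) (-1, "") := rfl
  have hInv := pvInv_foldl items values hv l (-1, "") (-1) (Or.inl ⟨rfl, rfl⟩)
  rw [← hA] at hInv
  -- identify B's best with the coupled running max
  have hbest :
      PySem.List.maxD (l.filter (fun i => decide (i > -1) && values.contains i))
        (fun x => x) (-1) = l.foldl (pvBStep values) (-1) := by
    rw [pvMaxD_pos]
    · rw [List.foldl_filter]
      rfl
    · intro x hx
      have := (List.mem_filter.mp hx).2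
      simp only [Bool.and_eq_true, decide_eq_true_eq] at this
      exact this.1
  show get_embedding_topic wi l = get_embedding_topic_alt wi l
  rw [get_embedding_topic_alt]
  simp only [← hvalues, ← hitems, hbest]
  rcases hInv with ⟨h1, h2⟩ | ⟨h1, h2, kv, h3, h4⟩
  · rw [h2, h1]
    simp
  · have hne : (l.foldl (pvBStep values) (-1) == (-1 : Int)) = false := by
      simp only [beq_eq_false_iff_ne, ne_eq]
      omega
    rw [if_neg (by simpa using h1.ne'), h3]
    exact Prod.ext h2 h4
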